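-- pv_equiv track=rewrite | github.com/EvanBianco/Practical_Programming_for_Geoscientists | scripts/read_log.py | get_curves
-- ===== SOURCE A (Python) =====
-- def should_skip_line(line):
-- 	return line.startswith('#')
--
-- def get_mnemonics(line):
-- 	return line.split()[1:]
--
-- def get_curves(source):
-- 	"""
-- 	Gets all the unique lithologies in a data file
-- 	"""
-- 	mnemonics = []
-- 	for line in source:
-- 		if should_skip_line(line):
-- 			pass
-- 		if line.startswith('~C'):
-- 			mnemonics = get_mnemonics(line)
-- 	return mnemonics
-- ===== SOURCE B (Python) =====
-- def get_curves(source):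
--     """
--     Gets all the unique lithologies in a data file
--     """
--     lines = list(source)
--     for line in reversed(lines):
--         if line.startswith('~C'):
--             return line.split()[1:]
--     return []
-- ===== Notes on version B (the rewrite author's own statement) =====
-- stated objective: alternative
-- what changed: A scans forward letting the last '~C' line overwrite the accumulator; B scans the materialised lines in reverse and returns the mnemonics of the first '~C' line hit, exiting early.
import Mathlib
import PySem

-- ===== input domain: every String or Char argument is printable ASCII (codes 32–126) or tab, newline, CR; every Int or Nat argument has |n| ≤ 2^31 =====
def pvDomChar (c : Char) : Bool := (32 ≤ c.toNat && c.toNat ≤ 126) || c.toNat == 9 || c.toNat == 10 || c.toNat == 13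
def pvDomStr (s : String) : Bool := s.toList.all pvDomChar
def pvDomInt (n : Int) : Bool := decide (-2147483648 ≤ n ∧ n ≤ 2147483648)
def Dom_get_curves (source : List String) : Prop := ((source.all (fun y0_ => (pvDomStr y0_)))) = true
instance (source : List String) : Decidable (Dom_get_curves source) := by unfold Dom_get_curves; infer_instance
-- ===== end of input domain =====

-- B scans the lines in reverse and returns on the first '~C' line, instead of A's
-- forward last-wins accumulation; same result, different decomposition.

-- ===== PORT A =====
def should_skip_line (line : String) : Bool := PySem.Str.startswith line "#"

def get_mnemonics (line : String) : List String := (PySem.Str.split₀ line).drop 1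

def get_curves (source : List String) : List String :=
  source.foldl (fun mnemonics line =>
    -- `if should_skip_line(line): pass` in A has no effect on the state
    if should_skip_line line then
      (if PySem.Str.startswith line "~C" then get_mnemonics line else mnemonics)
    else
      (if PySem.Str.startswith line "~C" then get_mnemonics line else mnemonics)) []

-- ===== PORT B =====
def get_curves_alt_loop : List String → List String
  | [] => []
  | line :: rest =>
    if PySem.Str.startswith line "~C" then get_mnemonics line
    else get_curves_alt_loop rest

def get_curves_alt (source : List String) : List String :=
  get_curves_alt_loop source.reverse

-- ===== PRECONDITION & SPEC =====
def Spec_get_curves (source : List String) (out : List String) : Prop := out = get_curves_alt source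
instance (source : List String) (out : List String) : Decidable (Spec_get_curves source out) := by unfold Spec_get_curves; infer_instance

-- ===== CLAIM (what is proved, stated in full; the proofs are below) =====
def Claim_equal_get_curves : Prop := ∀ (source : List String), Dom_get_curves source → Spec_get_curves source (get_curves source)

-- ===== LEMMAS AND PROOFS =====
theorem alt_loop_append (a b : List String) :
    get_curves_alt_loop (a ++ b) =
      if a.any (fun l => PySem.Str.startswith l "~C") then get_curves_alt_loop a
      else get_curves_alt_loop b := by
  induction a with
  | nil => simp [get_curves_alt_loop]
  | cons x t ih =>
    by_cases h : PySem.Str.startswith x "~C" = true <;>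
      [skip; simp only [Bool.not_eq_true] at h] <;>
      simp only [List.cons_append, get_curves_alt_loop, ih, List.any_cons, h, Bool.true_or,
        Bool.false_or, eq_self_iff_true, ite_true, Bool.false_eq_true, ite_false]

theorem alt_loop_none (l : List String)
    (h : l.any (fun s => PySem.Str.startswith s "~C") = false) :
    get_curves_alt_loop l = [] := by
  induction l with
  | nil => rfl
  | cons x t ih =>
    simp only [List.any_cons, Bool.or_eq_false_iff] at h
    simp only [get_curves_alt_loop, h.1, Bool.false_eq_true, ite_false, ih h.2]

theorem foldl_eq_alt (l : List String) (acc : List String) :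
    l.foldl (fun mnemonics line =>
      if should_skip_line line then
        (if PySem.Str.startswith line "~C" then get_mnemonics line else mnemonics)
      else
        (if PySem.Str.startswith line "~C" then get_mnemonics line else mnemonics)) acc =
      if l.any (fun s => PySem.Str.startswith s "~C") then get_curves_alt_loop l.reverse
      else acc := by
  simp only [ite_self]
  induction l generalizing acc with
  | nil => simp
  | cons x t ih =>
    simp only [List.foldl_cons, ite_self]
    rw [ih]
    simp only [List.any_cons, List.reverse_cons, alt_loop_append, List.any_reverse]
    by_cases hx : PySem.Str.startswith x "~C" = true <;>
      by_cases ht : t.any (fun s => PySem.Str.startswith s "~C") = true <;>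
        simp only [Bool.not_eq_true] at hx ht <;>
        simp only [hx, ht, get_curves_alt_loop, Bool.true_or, Bool.or_true, Bool.false_or,
          Bool.or_false, eq_self_iff_true, ite_true, Bool.false_eq_true, ite_false]

-- ===== VERDICT (by name: the statement is the Claim_ definition above) =====
theorem get_curves_spec : Claim_equal_get_curves := by
  intro source _
  unfold Spec_get_curves get_curves get_curves_alt
  rw [foldl_eq_alt]
  by_cases h : source.any (fun s => PySem.Str.startswith s "~C") = true
  · rw [if_pos h]
  · rw [if_neg h]
    simp only [Bool.not_eq_true] at h
    exact (alt_loop_none _ (by rw [List.any_reverse]; exact h)).symm
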